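-- pv_equiv track=rewrite | github.com/cardel/Cursos | MinticG72Ciclo1/Repaso/Ejercicio2.py | generar_numeros_for
-- ===== SOURCE A (Python) =====
-- def generar_numeros_for(a,b):
--     salida = ""
--     for i in range(a,b+1):
--         salida+=f" {i} "
--     salida+="\n"
--     for i in range(a,b+1,2):
--         salida+=f" {i} "
--     salida+="\n"
--     for i in range(a,b+1,3):
--         salida+=f" {i} "
--     salida+="\n"
--     for i in range(a,b+1,4):
--         salida+=f" {i} "
--     salida+="\n"
--     return salida
-- ===== SOURCE B (Python) =====
-- def generar_numeros_for(a, b):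
--     # One pass over a..b: each number is appended to the lines whose step divides
--     # its offset from a, instead of scanning the range once per step.
--     l1 = l2 = l3 = l4 = ""
--     for i in range(a, b + 1):
--         tok = f" {i} "
--         d = i - a
--         l1 += tok
--         if d % 2 == 0:
--             l2 += tok
--         if d % 3 == 0:
--             l3 += tok
--         if d % 4 == 0:
--             l4 += tok
--     return l1 + "\n" + l2 + "\n" + l3 + "\n" + l4 + "\n"
-- ===== Notes on version B (the rewrite author's own statement) =====
-- stated objective: alternative
-- what changed: Instead of A's four separate scans of range(a,b+1) with steps 1..4, B makes a single pass over a..b maintaining four line accumulators at once, deciding membership of each line by a divisibility test on the offset i-a.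
import Mathlib
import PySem

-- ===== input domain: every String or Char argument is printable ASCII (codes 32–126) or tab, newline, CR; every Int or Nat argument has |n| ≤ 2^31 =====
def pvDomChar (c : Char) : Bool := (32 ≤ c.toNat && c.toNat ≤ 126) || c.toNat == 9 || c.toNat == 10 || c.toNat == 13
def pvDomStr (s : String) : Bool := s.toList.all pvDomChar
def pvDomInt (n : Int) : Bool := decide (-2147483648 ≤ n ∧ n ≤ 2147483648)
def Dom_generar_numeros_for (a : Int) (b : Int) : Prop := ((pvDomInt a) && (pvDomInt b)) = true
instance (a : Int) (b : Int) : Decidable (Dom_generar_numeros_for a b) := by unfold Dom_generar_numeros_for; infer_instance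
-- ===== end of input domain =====

-- B replaces A's four scans of the range (one per step) by a single pass over a..b that
-- feeds four line accumulators at once, selecting lines by a divisibility test on i - a.

-- ===== PORT A =====
def generar_numeros_for (a : Int) (b : Int) : String :=
  let salida : String := ""
  let salida := (PySem.List.pyRange a (b+1) 1).foldl (fun s i => s ++ (" " ++ PySem.Int.toStr i ++ " ")) salida
  let salida := salida ++ "\n"
  let salida := (PySem.List.pyRange a (b+1) 2).foldl (fun s i => s ++ (" " ++ PySem.Int.toStr i ++ " ")) salida
  let salida := salida ++ "\n"
  let salida := (PySem.List.pyRange a (b+1) 3).foldl (fun s i => s ++ (" " ++ PySem.Int.toStr i ++ " ")) salida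
  let salida := salida ++ "\n"
  let salida := (PySem.List.pyRange a (b+1) 4).foldl (fun s i => s ++ (" " ++ PySem.Int.toStr i ++ " ")) salida
  let salida := salida ++ "\n"
  salida

-- ===== PORT B =====
-- tok = f" {i} "
def pvTok (i : Int) : String := " " ++ PySem.Int.toStr i ++ " "

-- single pass over range(a, b+1); state = the four lines (l1, l2, l3, l4)
def generar_numeros_for_alt (a : Int) (b : Int) : String :=
  let ls := (PySem.List.pyRange a (b+1) 1).foldl
    (fun (st : String × String × String × String) i =>
      ( st.1 ++ pvTok i,
        if PySem.Int.mod (i - a) 2 == 0 then st.2.1 ++ pvTok i else st.2.1,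
        if PySem.Int.mod (i - a) 3 == 0 then st.2.2.1 ++ pvTok i else st.2.2.1,
        if PySem.Int.mod (i - a) 4 == 0 then st.2.2.2 ++ pvTok i else st.2.2.2 ))
    ("", "", "", "")
  ls.1 ++ "\n" ++ ls.2.1 ++ "\n" ++ ls.2.2.1 ++ "\n" ++ ls.2.2.2 ++ "\n"

-- ===== PRECONDITION & SPEC =====
def Spec_generar_numeros_for (a : Int) (b : Int) (out : String) : Prop := out = generar_numeros_for_alt a b
instance (a : Int) (b : Int) (out : String) : Decidable (Spec_generar_numeros_for a b out) := by unfold Spec_generar_numeros_for; infer_instance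

-- ===== CLAIM (what is proved, stated in full; the proofs are below) =====
def Claim_equal_generar_numeros_for : Prop := ∀ (a : Int) (b : Int), Dom_generar_numeros_for a b → Spec_generar_numeros_for a b (generar_numeros_for a b)

-- ===== LEMMAS AND PROOFS =====

-- an append-fold factors out its initial string
theorem pv_foldl_str (l : List String) (init : String) :
    l.foldl (fun r s => r ++ s) init = init ++ l.foldl (fun r s => r ++ s) "" := by
  induction l generalizing init with
  | nil => simp [List.foldl]
  | cons y l ih =>
      simp only [List.foldl]
      rw [ih (init ++ y), ih ("" ++ y)]
      simp [String.append_assoc]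

-- appending-fold over a list of formatted pieces equals init ++ join of the pieces
theorem pv_foldl_append_join (f : Int → String) (xs : List Int) (init : String) :
    xs.foldl (fun s i => s ++ f i) init = init ++ String.join (xs.map f) := by
  induction xs generalizing init with
  | nil => simp [String.join]
  | cons x xs ih =>
      simp only [List.foldl, List.map, ih, String.join]
      rw [pv_foldl_str (List.map f xs) ("" ++ f x)]
      simp [String.append_assoc]

-- a positive-step range is strictly increasing
theorem pv_pairwise_pyRange (s : Int) (hs : 0 < s) (a t : Int) :
    (PySem.List.pyRange a t s).Pairwise (· < ·) := by
  rw [PySem.List.pyRange_of_pos a t hs]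
  exact List.pairwise_lt_range.map _ (fun x y hxy => by nlinarith)

-- the multiples-of-s offsets inside a step-1 range ARE the step-s range
theorem pv_filter_pyRange (s : Int) (hs : 0 < s) (a t : Int) :
    (PySem.List.pyRange a t 1).filter (fun i => PySem.Int.mod (i - a) s == 0)
      = PySem.List.pyRange a t s := by
  have h1 : ((PySem.List.pyRange a t 1).filter
      (fun i => PySem.Int.mod (i - a) s == 0)).Pairwise (· < ·) :=
    (pv_pairwise_pyRange 1 one_pos a t).filter _
  have h2 := pv_pairwise_pyRange s hs a t
  have hperm : ((PySem.List.pyRange a t 1).filter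
      (fun i => PySem.Int.mod (i - a) s == 0)).Perm (PySem.List.pyRange a t s) := by
    refine (List.perm_ext_iff_of_nodup (h1.nodup) (h2.nodup)).mpr (fun x => ?_)
    simp only [List.mem_filter, PySem.List.mem_pyRange_one,
      PySem.List.mem_pyRange_iff_of_pos hs, beq_iff_eq, PySem.Int.mod_eq_zero_iff_dvd]
    tauto
  exact hperm.eq_of_pairwise
    (fun x y _ _ (hxy : x < y) (hyx : y < x) => absurd hyx (not_lt.mpr hxy.le)) h1 h2

-- B's one-pass fold over the four-line state splits into four independent folds
theorem pv_fold4 (a : Int) (l : List Int) (s1 s2 s3 s4 : String) :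
    l.foldl
      (fun (st : String × String × String × String) i =>
        ( st.1 ++ pvTok i,
          if PySem.Int.mod (i - a) 2 == 0 then st.2.1 ++ pvTok i else st.2.1,
          if PySem.Int.mod (i - a) 3 == 0 then st.2.2.1 ++ pvTok i else st.2.2.1,
          if PySem.Int.mod (i - a) 4 == 0 then st.2.2.2 ++ pvTok i else st.2.2.2 ))
      (s1, s2, s3, s4)
    = ( l.foldl (fun s i => s ++ pvTok i) s1,
        l.foldl (fun s i => if PySem.Int.mod (i - a) 2 == 0 then s ++ pvTok i else s) s2,
        l.foldl (fun s i => if PySem.Int.mod (i - a) 3 == 0 then s ++ pvTok i else s) s3,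
        l.foldl (fun s i => if PySem.Int.mod (i - a) 4 == 0 then s ++ pvTok i else s) s4 ) := by
  induction l generalizing s1 s2 s3 s4 with
  | nil => rfl
  | cons x l ih => simp only [List.foldl]; rw [ih]

-- ===== VERDICT (by name: the statement is the Claim_ definition above) =====
theorem generar_numeros_for_spec : Claim_equal_generar_numeros_for := by
  intro a b _
  unfold Spec_generar_numeros_for generar_numeros_for generar_numeros_for_alt
  dsimp only
  rw [pv_fold4]
  rw [PySem.List.foldl_if_eq_foldl_filter (fun i => PySem.Int.mod (i - a) 2 == 0),
      PySem.List.foldl_if_eq_foldl_filter (fun i => PySem.Int.mod (i - a) 3 == 0),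
      PySem.List.foldl_if_eq_foldl_filter (fun i => PySem.Int.mod (i - a) 4 == 0)]
  rw [pv_filter_pyRange 2 (by norm_num) a (b+1),
      pv_filter_pyRange 3 (by norm_num) a (b+1),
      pv_filter_pyRange 4 (by norm_num) a (b+1)]
  simp only [pv_foldl_append_join]
  have htok : pvTok = fun i => " " ++ (PySem.Int.toStr i ++ " ") :=
    funext (fun i => by simp [pvTok, String.append_assoc])
  rw [htok]
  simp [String.append_assoc]
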